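-- pv_equiv track=rewrite | github.com/ShiningLab/Recurrent-Text-Editing | main/src/utils/pipeline.py | tagging_execution
-- ===== SOURCE A (Python) =====
-- def tagging_execution(x, y_):
--     p = []
--     x_ = x.copy()
--     x_token = x_.pop(0)
--     for y_token in y_:
--         if y_token == '<keep>':
--             # keep symbol
--             p.append(x_token)
--             if len(x_) == 0:
--                 break
--             x_token = x_.pop(0)
--         elif 'add' in y_token:
--             # add symbol
--             y_token = y_token.split('<add_')[1].split('>')[0]
--             p.append(y_token)
--         else:
--             # end symbol or pad symbol
--             pass
--
--     return p
-- ===== SOURCE B (Python) =====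
-- def tagging_execution(x, y_):
--     p = []
--     i = 0
--     n = len(x)
--     for t in y_:
--         if t == '<keep>':
--             p.append(x[i])
--             i += 1
--             if i == n:
--                 break
--         elif 'add' in t:
--             p.append(t.split('<add_')[1].split('>')[0])
--     return p
-- ===== Notes on version B (the rewrite author's own statement) =====
-- stated objective: faster
-- what changed: B walks an index pointer over x instead of copying x and popping its head for every '<keep>' op, removing the O(n) list shift per keep.
import Mathlib
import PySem

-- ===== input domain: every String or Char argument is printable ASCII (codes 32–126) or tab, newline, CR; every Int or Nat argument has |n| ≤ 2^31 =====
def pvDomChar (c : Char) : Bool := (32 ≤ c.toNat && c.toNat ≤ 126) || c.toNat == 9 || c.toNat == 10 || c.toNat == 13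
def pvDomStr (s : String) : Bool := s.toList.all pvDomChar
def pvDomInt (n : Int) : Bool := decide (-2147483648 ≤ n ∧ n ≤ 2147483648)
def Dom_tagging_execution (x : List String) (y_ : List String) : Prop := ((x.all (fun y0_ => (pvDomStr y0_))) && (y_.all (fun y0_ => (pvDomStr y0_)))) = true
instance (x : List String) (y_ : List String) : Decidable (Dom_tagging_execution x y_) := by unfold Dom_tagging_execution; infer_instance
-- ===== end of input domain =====

-- B replaces A's copy-x-and-pop(0)-per-'<keep>' loop by an index pointer into x (return value only; neither mutates its arguments).

-- shared by both ports: t.split('<add_')[1].split('>')[0]  (in range under Pre_)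
def pvAddToken (t : String) : String :=
  PySem.List.pyGetD ((PySem.Str.split?
    (PySem.List.pyGetD ((PySem.Str.split? t "<add_").getD []) 1 "") ">").getD []) 0 ""

-- ===== PORT A =====
-- the for-loop: state = (remaining x_, current x_token, accumulator p)
def pvLoopA (x_ : List String) (x_token : String) (y_ : List String) (p : List String) : List String :=
  match y_ with
  | [] => p
  | t :: ys =>
    if t = "<keep>" then
      match x_ with
      | [] => p ++ [x_token]                              -- break
      | x1 :: xrest => pvLoopA xrest x1 ys (p ++ [x_token])
    else if PySem.Str.isIn "add" t then
      pvLoopA x_ x_token ys (p ++ [pvAddToken t])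
    else
      pvLoopA x_ x_token ys p

def tagging_execution (x : List String) (y_ : List String) : List String :=
  match x with
  | [] => []                                              -- x_.pop(0) raises here; excluded by Pre_
  | x0 :: xrest => pvLoopA xrest x0 y_ []

-- ===== PORT B =====
def pvLoopB (x : List String) (n : Nat) (y_ : List String) (i : Nat) (p : List String) : List String :=
  match y_ with
  | [] => p
  | t :: ys =>
    if t = "<keep>" then
      let p' := p ++ [PySem.List.pyGetD x (i : Int) ""]
      if i + 1 = n then p'                                 -- break
      else pvLoopB x n ys (i + 1) p'
    else if PySem.Str.isIn "add" t then
      pvLoopB x n ys i (p ++ [pvAddToken t])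
    else
      pvLoopB x n ys i p

def tagging_execution_alt (x : List String) (y_ : List String) : List String :=
  pvLoopB x x.length y_ 0 []

-- ===== PRECONDITION & SPEC =====
-- A raises IndexError on x = [] (the initial pop(0)) and at any y_-token that is still reached
-- (i.e. fewer than len(x) '<keep>' ops precede it), is not '<keep>', contains 'add' but not '<add_'.
def Pre_tagging_execution (x : List String) (y_ : List String) : Prop :=
  x ≠ [] ∧ ∀ j < y_.length,
    ((y_.take j).countP (· = "<keep>")) < x.length →
    (PySem.Str.isIn "add" (y_.getD j "") = true → PySem.Str.isIn "<add_" (y_.getD j "") = true)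
instance (x : List String) (y_ : List String) : Decidable (Pre_tagging_execution x y_) := by
  unfold Pre_tagging_execution; infer_instance
def pvWitness_tagging_execution : List String × List String :=
  (["a", "b"], ["<keep>", "<add_5>", "<keep>", "<pad>"])

def Spec_tagging_execution (x : List String) (y_ : List String) (out : List String) : Prop :=
  out = tagging_execution_alt x y_
instance (x : List String) (y_ : List String) (out : List String) : Decidable (Spec_tagging_execution x y_ out) := by unfold Spec_tagging_execution; infer_instance

-- ===== CLAIM (what is proved, stated in full; the proofs are below) =====
def Claim_equal_tagging_execution : Prop := ∀ (x : List String) (y_ : List String), Dom_tagging_execution x y_ → Pre_tagging_execution x y_ → Spec_tagging_execution x y_ (tagging_execution x y_)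

-- ===== LEMMAS AND PROOFS =====

lemma pvLoop_eq (x : List String) (y_ : List String) :
    ∀ i p, i < x.length →
      pvLoopA (x.drop (i + 1)) (x.getD i "") y_ p = pvLoopB x x.length y_ i p := by
  induction y_ with
  | nil => intro i p _; simp [pvLoopA, pvLoopB]
  | cons t ys ih =>
    intro i p hi
    by_cases hk : t = "<keep>"
    · subst hk
      simp only [pvLoopA, pvLoopB]
      have hget : PySem.List.pyGetD x (i : Int) "" = x.getD i "" := by
        simp [PySem.List.pyGetD_natCast]
      by_cases hend : i + 1 = x.length
      · have : x.drop (i + 1) = [] := by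
          rw [hend]; simp
        rw [this, if_pos hend, hget]; simp
      · have hlt : i + 1 < x.length := by omega
        have hdrop : x.drop (i + 1) = x[i + 1] :: x.drop (i + 2) := by
          rw [List.drop_eq_getElem_cons hlt]
        rw [hdrop, if_neg hend, hget]
        have hg : x.getD (i + 1) "" = x[i + 1] := List.getD_eq_getElem x "" hlt
        rw [← hg]
        exact ih (i + 1) (p ++ [x.getD i ""]) hlt
    · simp only [pvLoopA, pvLoopB, if_neg hk]
      by_cases ha : PySem.Str.isIn "add" t = true
      · rw [if_pos ha, if_pos ha]; exact ih i _ hi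
      · rw [if_neg ha, if_neg ha]; exact ih i p hi

-- ===== VERDICT (by name: the statement is the Claim_ definition above) =====
theorem tagging_execution_spec : Claim_equal_tagging_execution := by
  intro x y_ _ hpre
  unfold Spec_tagging_execution tagging_execution tagging_execution_alt
  obtain ⟨hne, -⟩ := hpre
  match x, hne with
  | x0 :: xrest, _ =>
    have h := pvLoop_eq (x0 :: xrest) y_ 0 [] (by simp)
    simpa using h
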